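-- pv_equiv track=rewrite | github.com/e-gulmez/WLB | results/constraints.py | calculate_working_hours
-- ===== SOURCE A (Python) =====
-- def calculate_working_hours(assignments, shift_durations, doctors, days, num_shifts):
--     n_weeks = (days + 6) // 7
--     week_hours = [{doc: 0 for doc in doctors} for _ in range(max(1, n_weeks))]
--     daily_hours = {day: {doc: 0 for doc in doctors} for day in range(days)}
--
--     for day in range(days):
--         if day >= len(assignments): continue
--         for shift in range(num_shifts):
--             if shift >= len(assignments[day]): continue
--             duration = shift_durations[shift] if shift < len(shift_durations) else 0
--             week_idx = min(day // 7, len(week_hours) - 1)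
--             for doc in set(assignments[day][shift]):
--                 if doc in doctors:
--                     week_hours[week_idx][doc] += duration
--                     daily_hours[day][doc]      += duration
--
--     weekly_hours = {doc: max(week_hours[w][doc] for w in range(len(week_hours))) for doc in doctors}
--     return weekly_hours, daily_hours
-- ===== SOURCE B (Python) =====
-- def calculate_working_hours(assignments, shift_durations, doctors, days, num_shifts):
--     # Pass 1: fill only the daily table.
--     daily_hours = {day: {doc: 0 for doc in doctors} for day in range(days)}
--     for day in range(min(days, len(assignments))):
--         row = assignments[day]
--         dh = daily_hours[day]
--         for shift in range(num_shifts):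
--             if shift >= len(row):
--                 continue
--             duration = shift_durations[shift] if shift < len(shift_durations) else 0
--             for doc in set(row[shift]):
--                 if doc in doctors:
--                     dh[doc] += duration
--     # Pass 2: aggregate the finished daily table into week buckets (adding 0 is a no-op, so skip it).
--     n_buckets = max(1, (days + 6) // 7)
--     buckets = [{doc: 0 for doc in doctors} for _ in range(n_buckets)]
--     for day in range(days):
--         bucket = buckets[min(day // 7, n_buckets - 1)]
--         for doc, h in daily_hours[day].items():
--             if h:
--                 bucket[doc] += h
--     weekly_hours = {doc: max(b[doc] for b in buckets) for doc in doctors}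
--     return weekly_hours, daily_hours
-- ===== Notes on version B (the rewrite author's own statement) =====
-- stated objective: alternative
-- what changed: B first fills only the daily table in one pass, then a separate second pass folds the finished daily table into week buckets (iterating each day-dict's items instead of re-scanning assignments), and takes the per-doctor max over buckets; A accumulates weekly and daily totals simultaneously in one triple-nested loop.
import Mathlib
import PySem

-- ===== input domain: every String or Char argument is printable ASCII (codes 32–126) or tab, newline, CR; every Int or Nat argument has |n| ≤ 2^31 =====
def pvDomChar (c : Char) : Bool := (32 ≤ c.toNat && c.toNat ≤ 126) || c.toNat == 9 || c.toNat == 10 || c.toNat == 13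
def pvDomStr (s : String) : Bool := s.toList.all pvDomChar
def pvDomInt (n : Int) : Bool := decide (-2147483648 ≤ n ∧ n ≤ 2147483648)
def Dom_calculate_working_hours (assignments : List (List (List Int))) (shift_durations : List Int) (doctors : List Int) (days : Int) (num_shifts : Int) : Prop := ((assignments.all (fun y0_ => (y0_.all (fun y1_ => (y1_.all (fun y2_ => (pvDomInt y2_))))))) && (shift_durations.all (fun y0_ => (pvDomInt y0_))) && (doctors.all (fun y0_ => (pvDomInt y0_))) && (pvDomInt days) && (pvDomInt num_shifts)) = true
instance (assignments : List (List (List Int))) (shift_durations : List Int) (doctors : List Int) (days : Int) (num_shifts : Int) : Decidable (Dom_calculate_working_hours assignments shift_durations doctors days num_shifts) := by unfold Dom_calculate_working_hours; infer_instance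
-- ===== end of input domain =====

-- B replaces A's single triple loop (which accumulates weekly and daily totals together) by a
-- daily-table-first pass and a separate bucket-aggregation pass over the finished daily table
-- (objective: alternative decomposition, same asymptotic cost).

-- ===== PORT A =====
-- {doc: 0 for doc in doctors} — the dict comprehension both Pythons use verbatim
def pvInitDocs (doctors : List Int) : PySem.Dict Int Int :=
  doctors.foldl (fun d doc => d.insert doc 0) PySem.Dict.empty

def calculate_working_hours (assignments : List (List (List Int))) (shift_durations : List Int) (doctors : List Int) (days : Int) (num_shifts : Int) : (List (Int × Int)) × (List (Int × List (Int × Int))) :=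
  let n_weeks : Int := PySem.Int.floordiv (days + 6) 7
  let week_hours0 : List (PySem.Dict Int Int) :=
    (PySem.List.pyRange 0 (max 1 n_weeks) 1).map (fun _ => pvInitDocs doctors)
  let daily_hours0 : PySem.Dict Int (PySem.Dict Int Int) :=
    (PySem.List.pyRange 0 days 1).foldl (fun D day => D.insert day (pvInitDocs doctors)) PySem.Dict.empty
  let st :=
    (PySem.List.pyRange 0 days 1).foldl (fun st day =>
      if (assignments.length : Int) ≤ day then st else
      (PySem.List.pyRange 0 num_shifts 1).foldl (fun st shift =>
        if ((PySem.List.pyGetD assignments day []).length : Int) ≤ shift then st else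
        -- shift_durations[shift] with 0 ≤ shift < len: pyGetD is exact here
        let duration : Int := if shift < (shift_durations.length : Int) then PySem.List.pyGetD shift_durations shift 0 else 0
        let week_idx : Int := min (PySem.Int.floordiv day 7) ((st.1.length : Int) - 1)
        (PySem.Set.ofList (PySem.List.pyGetD (PySem.List.pyGetD assignments day []) shift [])).foldl (fun st doc =>
          if doc ∈ doctors then
            (PySem.List.pySetD st.1 week_idx ((PySem.List.pyGetD st.1 week_idx PySem.Dict.empty).modify doc 0 (· + duration)),
             st.2.modify day PySem.Dict.empty (fun dd => dd.modify doc 0 (· + duration)))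
          else st) st) st) (week_hours0, daily_hours0)
  -- max(...) over the week buckets: the list is nonempty (len(week_hours) ≥ 1), so .getD 0 is never used
  let weekly : PySem.Dict Int Int := doctors.foldl (fun acc doc =>
      acc.insert doc ((PySem.List.max? ((PySem.List.pyRange 0 (st.1.length : Int) 1).map
        (fun w => (PySem.List.pyGetD st.1 w PySem.Dict.empty).getD doc 0)) (fun x => x)).getD 0)) PySem.Dict.empty
  (weekly.items, st.2.items.map (fun p => (p.1, p.2.items)))

-- ===== PORT B =====
def calculate_working_hours_alt (assignments : List (List (List Int))) (shift_durations : List Int) (doctors : List Int) (days : Int) (num_shifts : Int) : (List (Int × Int)) × (List (Int × List (Int × Int))) :=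
  -- Pass 1: fill only the daily table
  let daily_hours0 : PySem.Dict Int (PySem.Dict Int Int) :=
    (PySem.List.pyRange 0 days 1).foldl (fun D day => D.insert day (pvInitDocs doctors)) PySem.Dict.empty
  let daily_hours :=
    (PySem.List.pyRange 0 (min days (assignments.length : Int)) 1).foldl (fun D day =>
      (PySem.List.pyRange 0 num_shifts 1).foldl (fun D shift =>
        if ((PySem.List.pyGetD assignments day []).length : Int) ≤ shift then D else
        let duration : Int := if shift < (shift_durations.length : Int) then PySem.List.pyGetD shift_durations shift 0 else 0
        (PySem.Set.ofList (PySem.List.pyGetD (PySem.List.pyGetD assignments day []) shift [])).foldl (fun D doc =>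
          if doc ∈ doctors then D.modify day PySem.Dict.empty (fun dd => dd.modify doc 0 (· + duration)) else D) D) D) daily_hours0
  -- Pass 2: aggregate the finished daily table into week buckets
  let n_buckets : Int := max 1 (PySem.Int.floordiv (days + 6) 7)
  let buckets0 : List (PySem.Dict Int Int) :=
    (PySem.List.pyRange 0 n_buckets 1).map (fun _ => pvInitDocs doctors)
  let buckets :=
    (PySem.List.pyRange 0 days 1).foldl (fun W day =>
      let w : Int := min (PySem.Int.floordiv day 7) (n_buckets - 1)
      (daily_hours.getD day PySem.Dict.empty).items.foldl (fun W p =>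
        if p.2 ≠ 0 then
          PySem.List.pySetD W w ((PySem.List.pyGetD W w PySem.Dict.empty).modify p.1 0 (· + p.2))
        else W) W) buckets0
  -- max(...) over the buckets: nonempty (n_buckets ≥ 1), so .getD 0 is never used
  let weekly : PySem.Dict Int Int := doctors.foldl (fun acc doc =>
      acc.insert doc ((PySem.List.max? (buckets.map (fun b => b.getD doc 0)) (fun x => x)).getD 0)) PySem.Dict.empty
  (weekly.items, daily_hours.items.map (fun p => (p.1, p.2.items)))

-- ===== PRECONDITION & SPEC =====
def Spec_calculate_working_hours (assignments : List (List (List Int))) (shift_durations : List Int) (doctors : List Int) (days : Int) (num_shifts : Int) (out : (List (Int × Int)) × (List (Int × List (Int × Int)))) : Prop := out = calculate_working_hours_alt assignments shift_durations doctors days num_shifts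
instance (assignments : List (List (List Int))) (shift_durations : List Int) (doctors : List Int) (days : Int) (num_shifts : Int) (out : (List (Int × Int)) × (List (Int × List (Int × Int)))) : Decidable (Spec_calculate_working_hours assignments shift_durations doctors days num_shifts out) := by unfold Spec_calculate_working_hours; infer_instance

-- ===== CLAIM (what is proved, stated in full; the proofs are below) =====
def Claim_equal_calculate_working_hours : Prop := ∀ (assignments : List (List (List Int))) (shift_durations : List Int) (doctors : List Int) (days : Int) (num_shifts : Int), Dom_calculate_working_hours assignments shift_durations doctors days num_shifts → Spec_calculate_working_hours assignments shift_durations doctors days num_shifts (calculate_working_hours assignments shift_durations doctors days num_shifts)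

-- ===== LEMMAS AND PROOFS =====

theorem pvFoldlPair {α β σ : Type} (l : List σ) (f : α → σ → α) (g : β → σ → β) (a : α) (b : β) :
    l.foldl (fun p x => (f p.1 x, g p.2 x)) (a, b) = (l.foldl f a, l.foldl g b) := by
  induction l generalizing a b with
  | nil => rfl
  | cons x t ih => simpa using ih (f a x) (g b x)

theorem pvFoldlId {α σ : Type} (l : List σ) (f : α → σ → α) (s : α)
    (h : ∀ s' x, x ∈ l → f s' x = s') : l.foldl f s = s := by
  induction l generalizing s with
  | nil => rfl
  | cons x t ih =>
    rw [List.foldl_cons, h s x (by simp)]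
    exact ih s (fun s' x' hx' => h s' x' (by simp [hx'])) 

theorem pvFoldlInv {α σ : Type} (l : List σ) (f g : α → σ → α) (P : α → Prop) (s : α)
    (hP : P s) (h : ∀ s' x, x ∈ l → P s' → f s' x = g s' x ∧ P (g s' x)) :
    l.foldl f s = l.foldl g s ∧ P (l.foldl g s) := by
  induction l generalizing s with
  | nil => exact ⟨rfl, hP⟩
  | cons x t ih =>
    obtain ⟨he, hp⟩ := h s x (by simp) hP
    rw [List.foldl_cons, List.foldl_cons, he]
    exact ih (g s x) hp (fun s' x' hx' => h s' x' (by simp [hx']))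

theorem pvFoldlTrunc {α : Type} (b t : Int) (ht : 0 ≤ t) (f : α → Int → α) (s : α) :
    (PySem.List.pyRange 0 b 1).foldl (fun s x => if t ≤ x then s else f s x) s
      = (PySem.List.pyRange 0 (min b t) 1).foldl (fun s x => if t ≤ x then s else f s x) s := by
  by_cases h : b ≤ t
  · rw [min_eq_left h]
  · rw [min_eq_right (by omega),
      PySem.List.pyRange_one_append 0 t b ht (by omega), List.foldl_append]
    apply pvFoldlId
    intro s' x hx
    rw [if_pos (PySem.List.mem_pyRange_one.1 hx).1]

-- pySetD/pyGetD at a fixed nonnegative in-range index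
theorem pvGetSet_self (W : List (PySem.Dict Int Int)) (w : Int) (hw0 : 0 ≤ w)
    (hw : w.toNat < W.length) :
    PySem.List.pySetD W w (PySem.List.pyGetD W w PySem.Dict.empty) = W := by
  rw [PySem.List.pySetD_of_nonneg _ _ hw0, PySem.List.pyGetD_of_nonneg _ _ hw0,
    List.getD_eq_getElem _ _ hw, List.set_getElem_self]

theorem pvGetD_setD_self (W : List (PySem.Dict Int Int)) (w : Int) (hw0 : 0 ≤ w)
    (hw : w.toNat < W.length) (d : PySem.Dict Int Int) :
    PySem.List.pyGetD (PySem.List.pySetD W w d) w PySem.Dict.empty = d := by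
  rw [PySem.List.pySetD_of_nonneg _ _ hw0, PySem.List.pyGetD_of_nonneg _ _ hw0,
    List.getD_eq_getElem _ _ (by simpa using hw), List.getElem_set_self]

theorem pvSetD_setD (W : List (PySem.Dict Int Int)) (w : Int) (hw0 : 0 ≤ w)
    (a b : PySem.Dict Int Int) :
    PySem.List.pySetD (PySem.List.pySetD W w a) w b = PySem.List.pySetD W w b := by
  rw [PySem.List.pySetD_of_nonneg _ _ hw0, PySem.List.pySetD_of_nonneg _ _ hw0,
    PySem.List.pySetD_of_nonneg _ _ hw0, List.set_set]

theorem pvSetFlatten {σ : Type} (l : List σ) (c : σ → Prop) [DecidablePred c]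
    (upd : PySem.Dict Int Int → σ → PySem.Dict Int Int) (W : List (PySem.Dict Int Int)) (w : Int)
    (hw0 : 0 ≤ w) (hw : w.toNat < W.length) :
    l.foldl (fun W' x => if c x then PySem.List.pySetD W' w (upd (PySem.List.pyGetD W' w PySem.Dict.empty) x) else W') W
      = PySem.List.pySetD W w (l.foldl (fun d x => if c x then upd d x else d) (PySem.List.pyGetD W w PySem.Dict.empty)) := by
  induction l generalizing W with
  | nil => exact (pvGetSet_self W w hw0 hw).symm
  | cons x t ih =>
    by_cases hc : c x
    · rw [List.foldl_cons, List.foldl_cons, if_pos hc, if_pos hc,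
        ih _ (by rw [PySem.List.length_pySetD]; exact hw),
        pvGetD_setD_self W w hw0 hw, pvSetD_setD W w hw0]
    · rw [List.foldl_cons, List.foldl_cons, if_neg hc, if_neg hc, ih W hw]

theorem pvSetFlattenNoIf {σ : Type} (l : List σ)
    (upd : PySem.Dict Int Int → σ → PySem.Dict Int Int) (W : List (PySem.Dict Int Int)) (w : Int)
    (hw0 : 0 ≤ w) (hw : w.toNat < W.length) :
    l.foldl (fun W' x => PySem.List.pySetD W' w (upd (PySem.List.pyGetD W' w PySem.Dict.empty) x)) W
      = PySem.List.pySetD W w (l.foldl upd (PySem.List.pyGetD W w PySem.Dict.empty)) := by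
  have h := pvSetFlatten l (fun _ => True) upd W w hw0 hw
  simpa using h

theorem pvKeysModifyMem (d : PySem.Dict Int Int) (k : Int) (d0 : Int) (f : Int → Int)
    (h : k ∈ d.keys) : (d.modify k d0 f).keys = d.keys := by
  rw [PySem.Dict.keys_modify, PySem.Dict.keys_insert_of_contains _ _ ((PySem.Dict.contains_iff_mem_keys _ _).2 h)]

theorem pvDictExt (d1 d2 : PySem.Dict Int Int) (hk : d1.keys = d2.keys) (hn : d1.keys.Nodup)
    (hg : ∀ k ∈ d1.keys, d1.getD k 0 = d2.getD k 0) : d1 = d2 := by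
  apply PySem.Dict.ext
  rw [PySem.Dict.items_eq_map_keys d1 hn 0, PySem.Dict.items_eq_map_keys d2 (hk ▸ hn) 0, ← hk]
  exact List.map_congr_left (fun k hk' => by rw [hg k hk'])

def pvDocStep (doctors : List Int) (duration : Int) (d : PySem.Dict Int Int) (doc : Int) : PySem.Dict Int Int :=
  if doc ∈ doctors then d.modify doc 0 (· + duration) else d

def pvDur (shift_durations : List Int) (shift : Int) : Int :=
  if shift < (shift_durations.length : Int) then PySem.List.pyGetD shift_durations shift 0 else 0

def pvShiftStep (assignments : List (List (List Int))) (shift_durations : List Int) (doctors : List Int) (day : Int) (d : PySem.Dict Int Int) (shift : Int) : PySem.Dict Int Int :=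
  if ((PySem.List.pyGetD assignments day []).length : Int) ≤ shift then d else
  (PySem.Set.ofList (PySem.List.pyGetD (PySem.List.pyGetD assignments day []) shift [])).foldl
    (pvDocStep doctors (pvDur shift_durations shift)) d

def pvDayDict (assignments : List (List (List Int))) (shift_durations : List Int) (doctors : List Int) (num_shifts : Int) (day : Int) (d : PySem.Dict Int Int) : PySem.Dict Int Int :=
  (PySem.List.pyRange 0 num_shifts 1).foldl (pvShiftStep assignments shift_durations doctors day) d

def pvInd (assignments : List (List (List Int))) (shift_durations : List Int) (doctors : List Int) (day k : Int) (shift : Int) : Int :=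
  if ((PySem.List.pyGetD assignments day []).length : Int) ≤ shift then 0 else
  if k ∈ PySem.Set.ofList (PySem.List.pyGetD (PySem.List.pyGetD assignments day []) shift []) ∧ k ∈ doctors then pvDur shift_durations shift else 0

def pvContrib (assignments : List (List (List Int))) (shift_durations : List Int) (doctors : List Int) (num_shifts : Int) (day k : Int) : Int :=
  ((PySem.List.pyRange 0 num_shifts 1).map (pvInd assignments shift_durations doctors day k)).sum

theorem pvDocStep_pos (doctors : List Int) (dur : Int) (d : PySem.Dict Int Int) (doc : Int)
    (h : doc ∈ doctors) : pvDocStep doctors dur d doc = d.modify doc 0 (· + dur) := by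
  simp [pvDocStep, h]

theorem pvDocStep_neg (doctors : List Int) (dur : Int) (d : PySem.Dict Int Int) (doc : Int)
    (h : doc ∉ doctors) : pvDocStep doctors dur d doc = d := by
  simp [pvDocStep, h]

theorem pvDocFold_getD (doctors : List Int) (dur : Int) (L : List Int) (hL : L.Nodup)
    (d : PySem.Dict Int Int) (k : Int) :
    (L.foldl (pvDocStep doctors dur) d).getD k 0
      = d.getD k 0 + (if k ∈ L ∧ k ∈ doctors then dur else 0) := by
  induction L generalizing d with
  | nil => simp
  | cons doc t ih =>
    obtain ⟨hnt, hT⟩ := List.nodup_cons.1 hL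
    rw [List.foldl_cons, ih hT]
    by_cases hd : doc ∈ doctors
    · rw [pvDocStep_pos _ _ _ _ hd, PySem.Dict.getD_modify]
      by_cases hk : k = doc
      · subst hk
        rw [if_pos rfl, if_neg (fun hc => hnt hc.1), if_pos ⟨List.mem_cons_self, hd⟩]; ring
      · rw [if_neg hk]
        congr 1
        simp [List.mem_cons, hk]
    · rw [pvDocStep_neg _ _ _ _ hd]
      congr 1
      by_cases hk : k = doc
      · subst hk; simp [hd]
      · simp [List.mem_cons, hk]

theorem pvDocFold_keys (doctors : List Int) (dur : Int) (L : List Int)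
    (d : PySem.Dict Int Int) (h : ∀ k, k ∈ doctors → k ∈ d.keys) :
    (L.foldl (pvDocStep doctors dur) d).keys = d.keys := by
  induction L generalizing d with
  | nil => rfl
  | cons doc t ih =>
    rw [List.foldl_cons]
    by_cases hd : doc ∈ doctors
    · rw [pvDocStep_pos _ _ _ _ hd,
        ih _ (fun k hk => by rw [pvKeysModifyMem _ _ _ _ (h doc hd)]; exact h k hk),
        pvKeysModifyMem _ _ _ _ (h doc hd)]
    · rw [pvDocStep_neg _ _ _ _ hd, ih _ h]

theorem pvShiftFold_getD (assignments : List (List (List Int))) (shift_durations : List Int)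
    (doctors : List Int) (day : Int) (l : List Int) (d : PySem.Dict Int Int) (k : Int) :
    (l.foldl (pvShiftStep assignments shift_durations doctors day) d).getD k 0
      = d.getD k 0 + (l.map (pvInd assignments shift_durations doctors day k)).sum := by
  induction l generalizing d with
  | nil => simp
  | cons s t ih =>
    rw [List.foldl_cons, ih, List.map_cons, List.sum_cons]
    have hstep : (pvShiftStep assignments shift_durations doctors day d s).getD k 0
        = d.getD k 0 + pvInd assignments shift_durations doctors day k s := by
      unfold pvShiftStep pvInd
      by_cases hg : ((PySem.List.pyGetD assignments day []).length : Int) ≤ s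
      · rw [if_pos hg, if_pos hg]; ring
      · rw [if_neg hg, if_neg hg,
          pvDocFold_getD _ _ _ (PySem.Set.nodup_ofList _) d k]
    rw [hstep]; ring

theorem pvShiftFold_keys (assignments : List (List (List Int))) (shift_durations : List Int)
    (doctors : List Int) (day : Int) (l : List Int) (d : PySem.Dict Int Int)
    (h : ∀ k, k ∈ doctors → k ∈ d.keys) :
    (l.foldl (pvShiftStep assignments shift_durations doctors day) d).keys = d.keys := by
  induction l generalizing d with
  | nil => rfl
  | cons s t ih =>
    have hstep : (pvShiftStep assignments shift_durations doctors day d s).keys = d.keys := by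
      unfold pvShiftStep
      by_cases hg : ((PySem.List.pyGetD assignments day []).length : Int) ≤ s
      · rw [if_pos hg]
      · rw [if_neg hg, pvDocFold_keys _ _ _ _ h]
    rw [List.foldl_cons, ih _ (fun k hk => hstep ▸ h k hk), hstep]

theorem pvInit_keys (doctors : List Int) :
    (pvInitDocs doctors).keys = PySem.List.dedup doctors := by
  unfold pvInitDocs
  rw [show (fun (d : PySem.Dict Int Int) (doc : Int) => d.insert doc 0)
      = (fun d x => d.insert x ((fun (_ : PySem.Dict Int Int) (_ : Int) => (0 : Int)) d x)) from rfl,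
    PySem.Dict.keys_foldl_insert, PySem.Dict.keys_empty, PySem.List.dedup_eq_ofList]
  exact PySem.Set.update_empty doctors

theorem pvInit_getD (doctors : List Int) (k : Int) : (pvInitDocs doctors).getD k 0 = 0 := by
  unfold pvInitDocs
  have : ∀ (l : List Int) (d : PySem.Dict Int Int), d.getD k 0 = 0 →
      (l.foldl (fun d doc => d.insert doc 0) d).getD k 0 = 0 := by
    intro l
    induction l with
    | nil => intro d h; exact h
    | cons x t ih =>
      intro d h
      rw [List.foldl_cons]
      apply ih
      rw [PySem.Dict.getD_insert]
      by_cases hk : k = x <;> simp [hk, h]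
  exact this doctors PySem.Dict.empty (PySem.Dict.getD_empty k 0)

theorem pvItemsFold_getD (xs : List Int) (hnd : xs.Nodup) (v : Int → Int)
    (d : PySem.Dict Int Int) (k : Int) :
    ((xs.map (fun k' => (k', v k'))).foldl
        (fun d (p : Int × Int) => if p.2 ≠ 0 then d.modify p.1 0 (· + p.2) else d) d).getD k 0
      = d.getD k 0 + (if k ∈ xs then v k else 0) := by
  induction xs generalizing d with
  | nil => simp
  | cons x t ih =>
    obtain ⟨hnt, hT⟩ := List.nodup_cons.1 hnd
    rw [List.map_cons, List.foldl_cons, ih hT]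
    by_cases hv : v x ≠ 0
    · rw [if_pos hv, PySem.Dict.getD_modify]
      by_cases hk : k = x
      · subst hk
        rw [if_pos rfl, if_neg (by exact hnt), if_pos List.mem_cons_self]; ring
      · rw [if_neg hk]
        congr 1
        simp [List.mem_cons, hk]
    · rw [if_neg hv]
      push_neg at hv
      congr 1
      by_cases hk : k = x
      · subst hk
        rw [if_neg (by exact hnt), if_pos List.mem_cons_self, hv]
      · simp [List.mem_cons, hk]

theorem pvItemsFold_keys (xs : List Int) (v : Int → Int)
    (d : PySem.Dict Int Int) (h : ∀ k' ∈ xs, k' ∈ d.keys) :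
    ((xs.map (fun k' => (k', v k'))).foldl
        (fun d (p : Int × Int) => if p.2 ≠ 0 then d.modify p.1 0 (· + p.2) else d) d).keys = d.keys := by
  induction xs generalizing d with
  | nil => rfl
  | cons x t ih =>
    have hx : x ∈ d.keys := h x List.mem_cons_self
    have hstep : (if (x, v x).2 ≠ 0 then d.modify (x, v x).1 0 (· + (x, v x).2) else d).keys = d.keys := by
      by_cases hv : v x ≠ 0
      · simp only [if_pos hv]
        exact pvKeysModifyMem _ _ _ _ hx
      · simp only [if_neg hv]
    rw [List.map_cons, List.foldl_cons,
      ih _ (fun k' hk' => hstep ▸ h k' (List.mem_cons_of_mem _ hk')), hstep]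

theorem pvInsertFold_getD (l : List Int) (c : PySem.Dict Int Int)
    (D : PySem.Dict Int (PySem.Dict Int Int)) (day : Int) :
    (l.foldl (fun D d => D.insert d c) D).getD day PySem.Dict.empty
      = if day ∈ l then c else D.getD day PySem.Dict.empty := by
  induction l generalizing D with
  | nil => simp
  | cons a t ih =>
    rw [List.foldl_cons, ih]
    by_cases ht : day ∈ t
    · rw [if_pos ht, if_pos (List.mem_cons_of_mem _ ht)]
    · rw [if_neg ht, PySem.Dict.getD_insert]
      by_cases ha : day = a
      · rw [if_pos ha, if_pos (by simp [ha])]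
      · rw [if_neg ha, if_neg (by simp [ha, ht])]

def pvLocalAt (day : Int) (F : PySem.Dict Int (PySem.Dict Int Int) → PySem.Dict Int (PySem.Dict Int Int))
    (f : PySem.Dict Int Int → PySem.Dict Int Int) : Prop :=
  ∀ (D : PySem.Dict Int (PySem.Dict Int Int)) (day' : Int),
    (F D).getD day' PySem.Dict.empty
      = if day' = day then f (D.getD day PySem.Dict.empty) else D.getD day' PySem.Dict.empty

theorem pvLocal_id (day : Int) : pvLocalAt day (fun D => D) (fun dd => dd) := by
  intro D day'
  by_cases h : day' = day
  · subst h; rw [if_pos rfl]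
  · rw [if_neg h]

theorem pvLocal_modify (day : Int) (g : PySem.Dict Int Int → PySem.Dict Int Int) :
    pvLocalAt day (fun D => D.modify day PySem.Dict.empty g) g := by
  intro D day'
  rw [PySem.Dict.getD_modify]

theorem pvLocal_ite (day : Int) (c : Prop) [Decidable c]
    (F : PySem.Dict Int (PySem.Dict Int Int) → PySem.Dict Int (PySem.Dict Int Int))
    (f : PySem.Dict Int Int → PySem.Dict Int Int) (h : pvLocalAt day F f) :
    pvLocalAt day (fun D => if c then F D else D) (fun dd => if c then f dd else dd) := by
  intro D day'
  by_cases hc : c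
  · simp only [if_pos hc]; exact h D day'
  · simp only [if_neg hc]; exact pvLocal_id day D day'

theorem pvLocal_ite' (day : Int) (c : Prop) [Decidable c]
    (F : PySem.Dict Int (PySem.Dict Int Int) → PySem.Dict Int (PySem.Dict Int Int))
    (f : PySem.Dict Int Int → PySem.Dict Int Int) (h : pvLocalAt day F f) :
    pvLocalAt day (fun D => if c then D else F D) (fun dd => if c then dd else f dd) := by
  intro D day'
  by_cases hc : c
  · simp only [if_pos hc]; exact pvLocal_id day D day'
  · simp only [if_neg hc]; exact h D day'

theorem pvLocal_comp (day : Int)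
    (F1 F2 : PySem.Dict Int (PySem.Dict Int Int) → PySem.Dict Int (PySem.Dict Int Int))
    (f1 f2 : PySem.Dict Int Int → PySem.Dict Int Int)
    (h1 : pvLocalAt day F1 f1) (h2 : pvLocalAt day F2 f2) :
    pvLocalAt day (fun D => F2 (F1 D)) (fun dd => f2 (f1 dd)) := by
  intro D day'
  rw [h2 (F1 D) day', h1 D day, h1 D day', if_pos rfl]
  by_cases h : day' = day <;> simp [h]

theorem pvLocal_foldl {σ : Type} (day : Int) (l : List σ)
    (G : PySem.Dict Int (PySem.Dict Int Int) → σ → PySem.Dict Int (PySem.Dict Int Int))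
    (g : PySem.Dict Int Int → σ → PySem.Dict Int Int)
    (h : ∀ x ∈ l, pvLocalAt day (fun D => G D x) (fun dd => g dd x)) :
    pvLocalAt day (fun D => l.foldl G D) (fun dd => l.foldl g dd) := by
  induction l with
  | nil => exact pvLocal_id day
  | cons x t ih =>
    have hstep := h x List.mem_cons_self
    have htail := ih (fun x' hx' => h x' (List.mem_cons_of_mem _ hx'))
    intro D day'
    simp only [List.foldl_cons]
    exact pvLocal_comp day (fun D => G D x) (fun D => t.foldl G D)
      (fun dd => g dd x) (fun dd => t.foldl g dd) hstep htail D day'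

theorem pvDayFold_getD (l : List Int) (hl : l.Nodup)
    (Fd : PySem.Dict Int (PySem.Dict Int Int) → Int → PySem.Dict Int (PySem.Dict Int Int))
    (fd : Int → PySem.Dict Int Int → PySem.Dict Int Int)
    (h : ∀ day ∈ l, pvLocalAt day (fun D => Fd D day) (fd day))
    (D : PySem.Dict Int (PySem.Dict Int Int)) (day0 : Int) :
    (l.foldl Fd D).getD day0 PySem.Dict.empty
      = if day0 ∈ l then fd day0 (D.getD day0 PySem.Dict.empty) else D.getD day0 PySem.Dict.empty := by
  induction l generalizing D with
  | nil => simp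
  | cons a t ih =>
    obtain ⟨hna, hT⟩ := List.nodup_cons.1 hl
    have hstep := h a List.mem_cons_self
    rw [List.foldl_cons, ih hT (fun d hd => h d (List.mem_cons_of_mem _ hd))]
    by_cases ht : day0 ∈ t
    · have hne : day0 ≠ a := fun he => hna (he ▸ ht)
      rw [if_pos ht, if_pos (List.mem_cons_of_mem _ ht), hstep D day0, if_neg hne]
    · rw [if_neg ht, hstep D day0]
      by_cases ha : day0 = a
      · rw [if_pos ha, if_pos (by simp [ha]), ha]
      · rw [if_neg ha, if_neg (by simp [ha, ht])]

theorem pvContribZero (assignments : List (List (List Int))) (shift_durations : List Int)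
    (doctors : List Int) (num_shifts : Int) (day k : Int)
    (h0 : 0 ≤ day) (hlen : (assignments.length : Int) ≤ day) :
    pvContrib assignments shift_durations doctors num_shifts day k = 0 := by
  have hrow : PySem.List.pyGetD assignments day [] = [] := by
    rw [PySem.List.pyGetD_of_nonneg _ _ h0]
    exact List.getD_eq_default _ _ (by omega)
  apply List.sum_eq_zero
  intro x hx
  obtain ⟨s, hs, hsx⟩ := List.mem_map.1 hx
  have h0s : (0 : Int) ≤ s := (PySem.List.mem_pyRange_one.1 hs).1
  rw [← hsx]
  unfold pvInd
  rw [hrow, if_pos (by simpa using h0s)]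

def pvDayW (assignments : List (List (List Int))) (shift_durations : List Int) (doctors : List Int)
    (num_shifts : Int) (W : List (PySem.Dict Int Int)) (day : Int) : List (PySem.Dict Int Int) :=
  if (assignments.length : Int) ≤ day then W else
  (PySem.List.pyRange 0 num_shifts 1).foldl (fun W shift =>
    if ((PySem.List.pyGetD assignments day []).length : Int) ≤ shift then W else
    let duration : Int := if shift < (shift_durations.length : Int) then PySem.List.pyGetD shift_durations shift 0 else 0
    let week_idx : Int := min (PySem.Int.floordiv day 7) ((W.length : Int) - 1)
    (PySem.Set.ofList (PySem.List.pyGetD (PySem.List.pyGetD assignments day []) shift [])).foldl (fun W doc =>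
      if doc ∈ doctors then
        PySem.List.pySetD W week_idx ((PySem.List.pyGetD W week_idx PySem.Dict.empty).modify doc 0 (· + duration))
      else W) W) W

def pvBDayBody (assignments : List (List (List Int))) (shift_durations : List Int) (doctors : List Int)
    (num_shifts : Int) (D : PySem.Dict Int (PySem.Dict Int Int)) (day : Int) : PySem.Dict Int (PySem.Dict Int Int) :=
  (PySem.List.pyRange 0 num_shifts 1).foldl (fun D shift =>
    if ((PySem.List.pyGetD assignments day []).length : Int) ≤ shift then D else
    let duration : Int := if shift < (shift_durations.length : Int) then PySem.List.pyGetD shift_durations shift 0 else 0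
    (PySem.Set.ofList (PySem.List.pyGetD (PySem.List.pyGetD assignments day []) shift [])).foldl (fun D doc =>
      if doc ∈ doctors then D.modify day PySem.Dict.empty (fun dd => dd.modify doc 0 (· + duration)) else D) D) D

def pvDayD (assignments : List (List (List Int))) (shift_durations : List Int) (doctors : List Int)
    (num_shifts : Int) (D : PySem.Dict Int (PySem.Dict Int Int)) (day : Int) : PySem.Dict Int (PySem.Dict Int Int) :=
  if (assignments.length : Int) ≤ day then D else pvBDayBody assignments shift_durations doctors num_shifts D day

theorem pvDocPair (L : List Int) (doctors : List Int) (dur widx day : Int)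
    (a : List (PySem.Dict Int Int)) (b : PySem.Dict Int (PySem.Dict Int Int)) :
    L.foldl (fun st doc =>
        if doc ∈ doctors then
          (PySem.List.pySetD st.1 widx ((PySem.List.pyGetD st.1 widx PySem.Dict.empty).modify doc 0 (· + dur)),
           st.2.modify day PySem.Dict.empty (fun dd => dd.modify doc 0 (· + dur)))
        else st) (a, b)
      = (L.foldl (fun W doc =>
            if doc ∈ doctors then PySem.List.pySetD W widx ((PySem.List.pyGetD W widx PySem.Dict.empty).modify doc 0 (· + dur)) else W) a,
         L.foldl (fun D doc =>
            if doc ∈ doctors then D.modify day PySem.Dict.empty (fun dd => dd.modify doc 0 (· + dur)) else D) b) := by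
  rw [← pvFoldlPair]
  apply List.foldl_ext
  intro p doc _
  by_cases h : doc ∈ doctors <;> simp [h]

theorem pvShiftPair (l : List Int) (assignments : List (List (List Int))) (shift_durations : List Int)
    (doctors : List Int) (day : Int)
    (a : List (PySem.Dict Int Int)) (b : PySem.Dict Int (PySem.Dict Int Int)) :
    l.foldl (fun st shift =>
        if ((PySem.List.pyGetD assignments day []).length : Int) ≤ shift then st else
        let duration : Int := if shift < (shift_durations.length : Int) then PySem.List.pyGetD shift_durations shift 0 else 0
        let week_idx : Int := min (PySem.Int.floordiv day 7) ((st.1.length : Int) - 1)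
        (PySem.Set.ofList (PySem.List.pyGetD (PySem.List.pyGetD assignments day []) shift [])).foldl (fun st doc =>
          if doc ∈ doctors then
            (PySem.List.pySetD st.1 week_idx ((PySem.List.pyGetD st.1 week_idx PySem.Dict.empty).modify doc 0 (· + duration)),
             st.2.modify day PySem.Dict.empty (fun dd => dd.modify doc 0 (· + duration)))
          else st) st) (a, b)
      = (l.foldl (fun W shift =>
          if ((PySem.List.pyGetD assignments day []).length : Int) ≤ shift then W else
          let duration : Int := if shift < (shift_durations.length : Int) then PySem.List.pyGetD shift_durations shift 0 else 0
          let week_idx : Int := min (PySem.Int.floordiv day 7) ((W.length : Int) - 1)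
          (PySem.Set.ofList (PySem.List.pyGetD (PySem.List.pyGetD assignments day []) shift [])).foldl (fun W doc =>
            if doc ∈ doctors then
              PySem.List.pySetD W week_idx ((PySem.List.pyGetD W week_idx PySem.Dict.empty).modify doc 0 (· + duration))
            else W) W) a,
        l.foldl (fun D shift =>
          if ((PySem.List.pyGetD assignments day []).length : Int) ≤ shift then D else
          let duration : Int := if shift < (shift_durations.length : Int) then PySem.List.pyGetD shift_durations shift 0 else 0
          (PySem.Set.ofList (PySem.List.pyGetD (PySem.List.pyGetD assignments day []) shift [])).foldl (fun D doc =>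
            if doc ∈ doctors then D.modify day PySem.Dict.empty (fun dd => dd.modify doc 0 (· + duration)) else D) D) b) := by
  rw [← pvFoldlPair]
  apply List.foldl_ext
  intro p shift _
  obtain ⟨a', b'⟩ := p
  by_cases hg : ((PySem.List.pyGetD assignments day []).length : Int) ≤ shift
  · simp only [if_pos hg]
  · simp only [if_neg hg]
    exact pvDocPair _ _ _ _ _ _ _

theorem pvSplit (assignments : List (List (List Int))) (shift_durations : List Int) (doctors : List Int)
    (days num_shifts : Int)
    (W0 : List (PySem.Dict Int Int)) (D0 : PySem.Dict Int (PySem.Dict Int Int)) :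
    (PySem.List.pyRange 0 days 1).foldl (fun st day =>
      if (assignments.length : Int) ≤ day then st else
      (PySem.List.pyRange 0 num_shifts 1).foldl (fun st shift =>
        if ((PySem.List.pyGetD assignments day []).length : Int) ≤ shift then st else
        let duration : Int := if shift < (shift_durations.length : Int) then PySem.List.pyGetD shift_durations shift 0 else 0
        let week_idx : Int := min (PySem.Int.floordiv day 7) ((st.1.length : Int) - 1)
        (PySem.Set.ofList (PySem.List.pyGetD (PySem.List.pyGetD assignments day []) shift [])).foldl (fun st doc =>
          if doc ∈ doctors then
            (PySem.List.pySetD st.1 week_idx ((PySem.List.pyGetD st.1 week_idx PySem.Dict.empty).modify doc 0 (· + duration)),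
             st.2.modify day PySem.Dict.empty (fun dd => dd.modify doc 0 (· + duration)))
          else st) st) st) (W0, D0)
      = ((PySem.List.pyRange 0 days 1).foldl (pvDayW assignments shift_durations doctors num_shifts) W0,
         (PySem.List.pyRange 0 days 1).foldl (pvDayD assignments shift_durations doctors num_shifts) D0) := by
  rw [← pvFoldlPair]
  apply List.foldl_ext
  intro p day _
  obtain ⟨a', b'⟩ := p
  unfold pvDayW pvDayD pvBDayBody
  by_cases hg : (assignments.length : Int) ≤ day
  · simp only [if_pos hg]
  · simp only [if_neg hg]
    exact pvShiftPair _ _ _ _ _ _ _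

theorem pvDailyEq (assignments : List (List (List Int))) (shift_durations : List Int)
    (doctors : List Int) (days num_shifts : Int) (D0 : PySem.Dict Int (PySem.Dict Int Int)) :
    (PySem.List.pyRange 0 days 1).foldl (pvDayD assignments shift_durations doctors num_shifts) D0
      = (PySem.List.pyRange 0 (min days (assignments.length : Int)) 1).foldl
          (pvBDayBody assignments shift_durations doctors num_shifts) D0 := by
  have h := pvFoldlTrunc days (assignments.length : Int) (Int.natCast_nonneg _)
    (fun D day => pvBDayBody assignments shift_durations doctors num_shifts D day) D0
  show (PySem.List.pyRange 0 days 1).foldl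
      (fun D day => if (assignments.length : Int) ≤ day then D
        else pvBDayBody assignments shift_durations doctors num_shifts D day) D0 = _
  rw [h]
  apply List.foldl_ext
  intro D day hday
  have := PySem.List.mem_pyRange_one.1 hday
  rw [if_neg (by omega)]

theorem pvBDayBody_local (assignments : List (List (List Int))) (shift_durations : List Int)
    (doctors : List Int) (num_shifts : Int) (day : Int) :
    pvLocalAt day (fun D => pvBDayBody assignments shift_durations doctors num_shifts D day)
      (pvDayDict assignments shift_durations doctors num_shifts day) := by
  unfold pvBDayBody pvDayDict
  apply pvLocal_foldl
  intro shift _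
  have hin := pvLocal_foldl day
    (PySem.Set.ofList (PySem.List.pyGetD (PySem.List.pyGetD assignments day []) shift []))
    (fun D doc => if doc ∈ doctors then
        D.modify day PySem.Dict.empty (fun dd => dd.modify doc 0 (· + pvDur shift_durations shift)) else D)
    (fun dd doc => if doc ∈ doctors then dd.modify doc 0 (· + pvDur shift_durations shift) else dd)
    (fun doc _ => pvLocal_ite day (doc ∈ doctors) _ _ (pvLocal_modify day _))
  exact pvLocal_ite' day (((PySem.List.pyGetD assignments day []).length : Int) ≤ shift) _ _ hin

theorem pvBDaily_facts (assignments : List (List (List Int))) (shift_durations : List Int)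
    (doctors : List Int) (days num_shifts : Int) (day0 : Int) (h0 : 0 ≤ day0) (hlt : day0 < days) :
    ((((PySem.List.pyRange 0 (min days (assignments.length : Int)) 1).foldl
        (pvBDayBody assignments shift_durations doctors num_shifts)
        ((PySem.List.pyRange 0 days 1).foldl (fun D day => D.insert day (pvInitDocs doctors)) PySem.Dict.empty)).getD
          day0 PySem.Dict.empty).keys = PySem.List.dedup doctors) ∧
    (∀ k, (((PySem.List.pyRange 0 (min days (assignments.length : Int)) 1).foldl
        (pvBDayBody assignments shift_durations doctors num_shifts)
        ((PySem.List.pyRange 0 days 1).foldl (fun D day => D.insert day (pvInitDocs doctors)) PySem.Dict.empty)).getD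
          day0 PySem.Dict.empty).getD k 0 = pvContrib assignments shift_durations doctors num_shifts day0 k) := by
  have hsub : ∀ k, k ∈ doctors → k ∈ (pvInitDocs doctors).keys := by
    intro k hk; rw [pvInit_keys]; exact (PySem.List.mem_dedup doctors k).2 hk
  have hget : (((PySem.List.pyRange 0 (min days (assignments.length : Int)) 1).foldl
      (pvBDayBody assignments shift_durations doctors num_shifts)
      ((PySem.List.pyRange 0 days 1).foldl (fun D day => D.insert day (pvInitDocs doctors)) PySem.Dict.empty)).getD
        day0 PySem.Dict.empty)
      = if day0 ∈ PySem.List.pyRange 0 (min days (assignments.length : Int)) 1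
        then pvDayDict assignments shift_durations doctors num_shifts day0 (pvInitDocs doctors)
        else pvInitDocs doctors := by
    rw [pvDayFold_getD _ (PySem.List.nodup_pyRange_one _ _) _
        (pvDayDict assignments shift_durations doctors num_shifts)
        (fun day _ => pvBDayBody_local assignments shift_durations doctors num_shifts day),
      pvInsertFold_getD, PySem.Dict.getD_empty,
      if_pos (PySem.List.mem_pyRange_one.2 ⟨h0, hlt⟩)]
  by_cases hm : day0 ∈ PySem.List.pyRange 0 (min days (assignments.length : Int)) 1
  · rw [hget, if_pos hm]
    constructor
    · unfold pvDayDict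
      rw [pvShiftFold_keys _ _ _ _ _ _ hsub, pvInit_keys]
    · intro k
      unfold pvDayDict pvContrib
      rw [pvShiftFold_getD, pvInit_getD, zero_add]
  · have hlen : (assignments.length : Int) ≤ day0 := by
      have hge : min days (assignments.length : Int) ≤ day0 := by
        by_contra hcon
        exact hm (PySem.List.mem_pyRange_one.2 ⟨h0, by omega⟩)
      omega
    rw [hget, if_neg hm]
    exact ⟨pvInit_keys doctors,
      fun k => by rw [pvInit_getD, pvContribZero _ _ _ _ _ _ h0 hlen]⟩

theorem pvWeeklyMax (doctors : List Int) (W : List (PySem.Dict Int Int)) :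
    doctors.foldl (fun acc doc => acc.insert doc ((PySem.List.max?
        ((PySem.List.pyRange 0 (W.length : Int) 1).map (fun w => (PySem.List.pyGetD W w PySem.Dict.empty).getD doc 0))
        (fun x => x)).getD 0)) PySem.Dict.empty
      = doctors.foldl (fun acc doc => acc.insert doc ((PySem.List.max?
          (W.map (fun b => b.getD doc 0)) (fun x => x)).getD 0)) PySem.Dict.empty := by
  apply List.foldl_ext
  intro acc doc _
  have hl : (PySem.List.pyRange 0 (W.length : Int) 1).map (fun w => (PySem.List.pyGetD W w PySem.Dict.empty).getD doc 0)
      = W.map (fun b => b.getD doc 0) := by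
    conv_rhs => rw [← PySem.List.map_pyGetD_pyRange_zero' W PySem.Dict.empty]
    rw [List.map_map]
    rfl
  rw [hl]

theorem pvWeekEq (assignments : List (List (List Int))) (shift_durations : List Int)
    (doctors : List Int) (days num_shifts nB : Int) (hnB : 1 ≤ nB)
    (daily : PySem.Dict Int (PySem.Dict Int Int))
    (hdaily : ∀ day0, 0 ≤ day0 → day0 < days →
      ((daily.getD day0 PySem.Dict.empty).keys = PySem.List.dedup doctors ∧
       ∀ k, (daily.getD day0 PySem.Dict.empty).getD k 0
          = pvContrib assignments shift_durations doctors num_shifts day0 k)) :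
    (PySem.List.pyRange 0 days 1).foldl (pvDayW assignments shift_durations doctors num_shifts)
        ((PySem.List.pyRange 0 nB 1).map (fun _ => pvInitDocs doctors))
      = (PySem.List.pyRange 0 days 1).foldl (fun W day =>
          (daily.getD day PySem.Dict.empty).items.foldl (fun W p =>
            if p.2 ≠ 0 then
              PySem.List.pySetD W (min (PySem.Int.floordiv day 7) (nB - 1))
                ((PySem.List.pyGetD W (min (PySem.Int.floordiv day 7) (nB - 1)) PySem.Dict.empty).modify p.1 0 (· + p.2))
            else W) W)
        ((PySem.List.pyRange 0 nB 1).map (fun _ => pvInitDocs doctors)) := by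
  have hP0 : ((PySem.List.pyRange 0 nB 1).map (fun _ => pvInitDocs doctors)).length = nB.toNat ∧
      ∀ d ∈ (PySem.List.pyRange 0 nB 1).map (fun _ => pvInitDocs doctors),
        d.keys = PySem.List.dedup doctors := by
    constructor
    · rw [List.length_map, PySem.List.length_pyRange_one, sub_zero]
    · intro d hd
      obtain ⟨_, _, rfl⟩ := List.mem_map.1 hd
      exact pvInit_keys doctors
  refine (pvFoldlInv _ _ _
    (fun W => W.length = nB.toNat ∧ ∀ d ∈ W, d.keys = PySem.List.dedup doctors) _ hP0 ?_).1
  intro W day hday hP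
  obtain ⟨h0, hlt⟩ := PySem.List.mem_pyRange_one.1 hday
  obtain ⟨hlen, hmem⟩ := hP
  have hfd : 0 ≤ PySem.Int.floordiv day 7 := by
    rw [PySem.Int.floordiv_eq_ediv_of_pos (by norm_num : (0:Int) < 7)]
    exact Int.ediv_nonneg h0 (by norm_num)
  set w0 := min (PySem.Int.floordiv day 7) (nB - 1) with hw0def
  have hw0 : 0 ≤ w0 := by omega
  have hwlt : w0.toNat < W.length := by omega
  set gw := PySem.List.pyGetD W w0 PySem.Dict.empty with hgwdef
  have hgwmem : gw ∈ W := by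
    rw [hgwdef, PySem.List.pyGetD_of_nonneg _ _ hw0, List.getD_eq_getElem _ _ hwlt]
    exact List.getElem_mem _
  have hkgw : gw.keys = PySem.List.dedup doctors := hmem _ hgwmem
  obtain ⟨hdk, hdg⟩ := hdaily day h0 hlt
  have hnd : (daily.getD day PySem.Dict.empty).keys.Nodup := by
    rw [hdk]; exact PySem.List.nodup_dedup doctors
  have hitems : (daily.getD day PySem.Dict.empty).items
      = (PySem.List.dedup doctors).map
          (fun k => (k, pvContrib assignments shift_durations doctors num_shifts day k)) := by
    rw [PySem.Dict.items_eq_map_keys _ hnd 0, hdk]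
    exact List.map_congr_left (fun k _ => by rw [hdg k])
  have hB : (daily.getD day PySem.Dict.empty).items.foldl (fun W' p =>
        if p.2 ≠ 0 then
          PySem.List.pySetD W' w0 ((PySem.List.pyGetD W' w0 PySem.Dict.empty).modify p.1 0 (· + p.2))
        else W') W
      = PySem.List.pySetD W w0
          (((PySem.List.dedup doctors).map
            (fun k => (k, pvContrib assignments shift_durations doctors num_shifts day k))).foldl
            (fun d (p : Int × Int) => if p.2 ≠ 0 then d.modify p.1 0 (· + p.2) else d) gw) := by
    rw [hitems, pvSetFlatten _ (fun (p : Int × Int) => p.2 ≠ 0)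
      (fun d (p : Int × Int) => d.modify p.1 0 (· + p.2)) W w0 hw0 hwlt]
  have hkeysB : (((PySem.List.dedup doctors).map
        (fun k => (k, pvContrib assignments shift_durations doctors num_shifts day k))).foldl
        (fun d (p : Int × Int) => if p.2 ≠ 0 then d.modify p.1 0 (· + p.2) else d) gw).keys = gw.keys :=
    pvItemsFold_keys _ _ _ (fun k hk => by rw [hkgw]; exact hk)
  have hPg : ((daily.getD day PySem.Dict.empty).items.foldl (fun W' p =>
        if p.2 ≠ 0 then
          PySem.List.pySetD W' w0 ((PySem.List.pyGetD W' w0 PySem.Dict.empty).modify p.1 0 (· + p.2))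
        else W') W).length = nB.toNat ∧
      ∀ d ∈ (daily.getD day PySem.Dict.empty).items.foldl (fun W' p =>
        if p.2 ≠ 0 then
          PySem.List.pySetD W' w0 ((PySem.List.pyGetD W' w0 PySem.Dict.empty).modify p.1 0 (· + p.2))
        else W') W,
        d.keys = PySem.List.dedup doctors := by
    rw [hB]
    constructor
    · rw [PySem.List.length_pySetD]; exact hlen
    · intro d hd
      rw [PySem.List.pySetD_of_nonneg _ _ hw0] at hd
      rcases List.mem_or_eq_of_mem_set hd with h | h
      · exact hmem _ h
      · rw [h, hkeysB, hkgw]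
  refine ⟨?_, hPg⟩
  by_cases hlenA : (assignments.length : Int) ≤ day
  · have hzero : ∀ k, pvContrib assignments shift_durations doctors num_shifts day k = 0 :=
      fun k => pvContribZero _ _ _ _ _ k h0 hlenA
    have hinner : (((PySem.List.dedup doctors).map
          (fun k => (k, pvContrib assignments shift_durations doctors num_shifts day k))).foldl
          (fun d (p : Int × Int) => if p.2 ≠ 0 then d.modify p.1 0 (· + p.2) else d) gw) = gw := by
      apply pvDictExt _ _ hkeysB (by rw [hkeysB, hkgw]; exact PySem.List.nodup_dedup doctors)
      intro k _
      rw [pvItemsFold_getD _ (PySem.List.nodup_dedup doctors) _ gw k]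
      by_cases hkd : k ∈ PySem.List.dedup doctors
      · rw [if_pos hkd, hzero, add_zero]
      · rw [if_neg hkd, add_zero]
    show pvDayW assignments shift_durations doctors num_shifts W day = _
    unfold pvDayW
    rw [if_pos hlenA, hB, hinner, pvGetSet_self W w0 hw0 hwlt]
  · have hA : pvDayW assignments shift_durations doctors num_shifts W day
        = PySem.List.pySetD W w0
            (pvDayDict assignments shift_durations doctors num_shifts day gw) := by
      unfold pvDayW
      rw [if_neg hlenA]
      have hstep := pvFoldlInv (PySem.List.pyRange 0 num_shifts 1)
        (fun W' shift =>
          if ((PySem.List.pyGetD assignments day []).length : Int) ≤ shift then W' else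
          (PySem.Set.ofList (PySem.List.pyGetD (PySem.List.pyGetD assignments day []) shift [])).foldl (fun W'' doc =>
            if doc ∈ doctors then
              PySem.List.pySetD W'' (min (PySem.Int.floordiv day 7) ((W'.length : Int) - 1))
                ((PySem.List.pyGetD W'' (min (PySem.Int.floordiv day 7) ((W'.length : Int) - 1)) PySem.Dict.empty).modify doc 0
                  (· + (if shift < (shift_durations.length : Int) then PySem.List.pyGetD shift_durations shift 0 else 0)))
            else W'') W')
        (fun W' shift => PySem.List.pySetD W' w0
          (pvShiftStep assignments shift_durations doctors day (PySem.List.pyGetD W' w0 PySem.Dict.empty) shift))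
        (fun W' => W'.length = W.length) W rfl ?_
      · rw [hstep.1,
          pvSetFlattenNoIf _ (fun d shift => pvShiftStep assignments shift_durations doctors day d shift) W w0 hw0 hwlt]
        rfl
      · intro W' s _ hP'
        dsimp only
        have hwlt' : w0.toNat < W'.length := by omega
        have hc : ((W'.length : Int) - 1) = nB - 1 := by omega
        by_cases hrow : ((PySem.List.pyGetD assignments day []).length : Int) ≤ s
        · constructor
          · rw [if_pos hrow]
            have hss : pvShiftStep assignments shift_durations doctors day
                (PySem.List.pyGetD W' w0 PySem.Dict.empty) s = PySem.List.pyGetD W' w0 PySem.Dict.empty := by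
              unfold pvShiftStep; rw [if_pos hrow]
            rw [hss, pvGetSet_self W' w0 hw0 hwlt']
          · rw [PySem.List.length_pySetD]; exact hP'
        · constructor
          · rw [if_neg hrow, hc, ← hw0def,
              pvSetFlatten _ (fun doc => doc ∈ doctors)
                (fun d doc => d.modify doc 0
                  (· + (if s < (shift_durations.length : Int) then PySem.List.pyGetD shift_durations s 0 else 0)))
                W' w0 hw0 hwlt']
            unfold pvShiftStep
            rw [if_neg hrow]
            rfl
          · rw [PySem.List.length_pySetD]; exact hP'
    rw [hA, hB]
    have hkeysA : (pvDayDict assignments shift_durations doctors num_shifts day gw).keys = gw.keys := by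
      unfold pvDayDict
      exact pvShiftFold_keys _ _ _ _ _ _
        (fun k hk => by rw [hkgw]; exact (PySem.List.mem_dedup doctors k).2 hk)
    have hinner : pvDayDict assignments shift_durations doctors num_shifts day gw
        = (((PySem.List.dedup doctors).map
            (fun k => (k, pvContrib assignments shift_durations doctors num_shifts day k))).foldl
            (fun d (p : Int × Int) => if p.2 ≠ 0 then d.modify p.1 0 (· + p.2) else d) gw) := by
      apply pvDictExt _ _ (by rw [hkeysA, hkeysB]) (by rw [hkeysA, hkgw]; exact PySem.List.nodup_dedup doctors)
      intro k hk
      rw [hkeysA, hkgw] at hk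
      unfold pvDayDict
      rw [pvShiftFold_getD, pvItemsFold_getD _ (PySem.List.nodup_dedup doctors) _ gw k, if_pos hk]
      rfl
    rw [hinner]


-- ===== VERDICT (by name: the statement is the Claim_ definition above) =====
theorem calculate_working_hours_spec : Claim_equal_calculate_working_hours := by
  intro assignments shift_durations doctors days num_shifts _
  unfold Spec_calculate_working_hours
  simp only [calculate_working_hours, calculate_working_hours_alt]
  rw [pvSplit]
  rw [pvWeekEq assignments shift_durations doctors days num_shifts
        (max 1 (PySem.Int.floordiv (days + 6) 7)) (le_max_left _ _)
        ((PySem.List.pyRange 0 (min days (assignments.length : Int)) 1).foldl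
          (pvBDayBody assignments shift_durations doctors num_shifts)
          ((PySem.List.pyRange 0 days 1).foldl (fun D day => D.insert day (pvInitDocs doctors)) PySem.Dict.empty))
        (fun day0 h0 hlt => pvBDaily_facts assignments shift_durations doctors days num_shifts day0 h0 hlt)]
  rw [pvDailyEq]
  rw [pvWeeklyMax]
  rfl
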